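-- pv_equiv track=rewrite | github.com/selinamead/Software-Specification-Evaluation-and-Analysis-using-NLP-and-Machine-Learning | NLP_Features.py | search_specific_words
-- ===== SOURCE A (Python) =====
-- def search_specific_words(attribute, search_word):
--      if search_word=="beispiel":
--           word = ["z.b.","zb","zum beispiel","zb."]
--      elif search_word=="circa":
--           word = ["circa","ca","ca."]
--      else: word = [search_word.lower()]
--      i = 0
--      for w in range(len(attribute)):
--           if attribute[w][0].lower() in word:
--                i+=1
--      return i
-- ===== SOURCE B (Python) =====
-- def search_specific_words(attribute, search_word):
--     if search_word == "beispiel":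
--         word = ["z.b.", "zb", "zum beispiel", "zb."]
--     elif search_word == "circa":
--         word = ["circa", "ca", "ca."]
--     else:
--         word = [search_word.lower()]
--     counts = {}
--     for a in attribute:
--         k = a[0].lower()
--         counts[k] = counts.get(k, 0) + 1
--     return sum(counts.get(w, 0) for w in word)
-- ===== Notes on version B (the rewrite author's own statement) =====
-- stated objective: alternative
-- what changed: Instead of scanning attribute with a membership test against the word list, B builds a frequency dictionary of lowercased first elements in one pass and then sums the counts of the target words.
import Mathlib
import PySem

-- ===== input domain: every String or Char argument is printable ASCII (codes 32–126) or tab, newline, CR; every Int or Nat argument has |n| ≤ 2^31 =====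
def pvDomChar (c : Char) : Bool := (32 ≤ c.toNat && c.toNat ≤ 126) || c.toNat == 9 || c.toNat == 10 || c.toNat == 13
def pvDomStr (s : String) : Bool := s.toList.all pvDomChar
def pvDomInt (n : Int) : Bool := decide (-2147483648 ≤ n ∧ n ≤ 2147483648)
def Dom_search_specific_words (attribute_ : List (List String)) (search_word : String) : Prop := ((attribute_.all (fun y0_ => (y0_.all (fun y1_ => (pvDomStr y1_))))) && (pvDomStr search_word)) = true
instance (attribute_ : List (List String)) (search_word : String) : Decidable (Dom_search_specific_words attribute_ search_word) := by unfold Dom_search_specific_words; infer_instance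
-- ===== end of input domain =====

-- B builds a frequency dictionary of lowercased first elements, then sums the counts of the target words (same word-list prelude as A).

-- ===== PORT A =====
def sswWords (search_word : String) : List String :=
  if search_word == "beispiel" then ["z.b.", "zb", "zum beispiel", "zb."]
  else if search_word == "circa" then ["circa", "ca", "ca."]
  else [PySem.Str.lower search_word]

def search_specific_words (attribute_ : List (List String)) (search_word : String) : Int :=
  let word := sswWords search_word
  (PySem.List.pyRange 0 attribute_.length 1).foldl
    (fun i w =>
      if word.contains (PySem.Str.lower (PySem.List.pyGetD (PySem.List.pyGetD attribute_ w []) 0 "")) then i + 1 else i)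
    0

-- ===== PORT B =====
def search_specific_words_alt (attribute_ : List (List String)) (search_word : String) : Int :=
  let word := sswWords search_word
  let counts : PySem.Dict String Int :=
    attribute_.foldl
      (fun d a =>
        let k := PySem.Str.lower (PySem.List.pyGetD a 0 "")
        d.insert k (d.getD k 0 + 1))
      PySem.Dict.empty
  word.foldl (fun s w => s + counts.getD w 0) 0

-- ===== PRECONDITION & SPEC =====
-- Pre_ excludes inputs containing an empty inner list: Python A raises IndexError on attribute[w][0] there (B raises too).
def Pre_search_specific_words (attribute_ : List (List String)) (search_word : String) : Prop :=
  ∀ a ∈ attribute_, a ≠ []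
instance (attribute_ : List (List String)) (search_word : String) : Decidable (Pre_search_specific_words attribute_ search_word) := by unfold Pre_search_specific_words; infer_instance
def pvWitness_search_specific_words : List (List String) × String := ([["z.b."], ["Foo"], ["ZB"]], "beispiel")

def Spec_search_specific_words (attribute_ : List (List String)) (search_word : String) (out : Int) : Prop := out = search_specific_words_alt attribute_ search_word
instance (attribute_ : List (List String)) (search_word : String) (out : Int) : Decidable (Spec_search_specific_words attribute_ search_word out) := by unfold Spec_search_specific_words; infer_instance

-- ===== CLAIM (what is proved, stated in full; the proofs are below) =====
def Claim_equal_search_specific_words : Prop := ∀ (attribute_ : List (List String)) (search_word : String), Dom_search_specific_words attribute_ search_word → Pre_search_specific_words attribute_ search_word → Spec_search_specific_words attribute_ search_word (search_specific_words attribute_ search_word)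

-- ===== LEMMAS AND PROOFS =====

-- disjoint countP sums
theorem countP_or_disjoint (ys : List String) (p q : String → Bool)
    (h : ∀ y, ¬(p y = true ∧ q y = true)) :
    ys.countP (fun y => p y || q y) = ys.countP p + ys.countP q := by
  induction ys with
  | nil => simp
  | cons y ys ih =>
    simp only [List.countP_cons, ih]
    by_cases hp : p y = true
    · have hq : q y = false := by
        cases hq : q y
        · rfl
        · exact absurd ⟨hp, hq⟩ (h y)
      simp [hp, hq]; omega
    · simp at hp
      simp [hp]
      by_cases hq : q y = true <;> simp [hq] <;> omega

-- summing exact counts over a duplicate-free word list equals one membership-filtered count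
theorem foldl_count_eq_countP (word ys : List String) (hnd : word.Nodup) (s : Int) :
    word.foldl (fun s w => s + (ys.count w : Int)) s
      = s + (ys.countP (fun y => word.contains y) : Int) := by
  induction word generalizing s with
  | nil => simp
  | cons w word ih =>
    have hw : w ∉ word := (List.nodup_cons.mp hnd).1
    have hnd' : word.Nodup := (List.nodup_cons.mp hnd).2
    simp only [List.foldl_cons]
    rw [ih hnd']
    have hsplit : ys.countP (fun y => (w :: word).contains y)
        = ys.countP (fun y => y == w) + ys.countP (fun y => word.contains y) := by
      rw [← countP_or_disjoint ys (fun y => y == w) (fun y => word.contains y)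
        (by intro y ⟨h1, h2⟩
            have : y = w := by simpa using h1
            subst this
            exact hw (by simpa using h2))]
      apply List.countP_congr
      intro y _
      simp
    have hc : ys.count w = ys.countP (fun y => y == w) := List.count_eq_countP
    rw [hsplit, hc]
    push_cast
    ring

theorem sswWords_nodup (search_word : String) : (sswWords search_word).Nodup := by
  unfold sswWords
  split
  · decide
  · split
    · decide
    · simp

-- ===== VERDICT (by name: the statement is the Claim_ definition above) =====
theorem search_specific_words_spec : Claim_equal_search_specific_words := by
  intro attribute_ search_word _ _
  unfold Spec_search_specific_words search_specific_words search_specific_words_alt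
  dsimp only
  set word := sswWords search_word with hword
  set key : List String → String := fun a => PySem.Str.lower (PySem.List.pyGetD a 0 "") with hkey
  -- A side: index loop over pyRange becomes a foldl over attribute_, i.e. a countP
  rw [PySem.List.foldl_pyRange_zero_pyGetD' attribute_ []
      (fun i a => if word.contains (key a) then i + 1 else i) 0]
  rw [PySem.List.foldl_if_add_one (fun a => word.contains (key a)) attribute_ 0]
  -- B side: the counter fold over attribute_ is the counter of the mapped keys
  have hB : attribute_.foldl
      (fun d a => d.insert (key a) (d.getD (key a) 0 + 1)) PySem.Dict.empty
      = (attribute_.map key).foldl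
          (fun (d : PySem.Dict String Int) (x : String) => d.insert x (d.getD x 0 + 1))
          PySem.Dict.empty := by rw [List.foldl_map]
  rw [hB]
  have hfold : word.foldl (fun s w => s + ((attribute_.map key).foldl
        (fun d x => d.insert x (d.getD x 0 + 1)) PySem.Dict.empty).getD w 0) 0
      = word.foldl (fun s w => s + ((attribute_.map key).count w : Int)) 0 := by
    apply PySem.List.foldl_congr_mem
    intro s w _
    rw [PySem.Dict.getD_foldl_insert_add_one]
    simp [PySem.Dict.empty, PySem.Dict.getD, PySem.Dict.get?]
  rw [hfold, foldl_count_eq_countP word (attribute_.map key) (sswWords_nodup search_word) 0]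
  simp [List.countP_map, Function.comp_def]
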